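-- pv_equiv track=rewrite | github.com/j1mk1m/SpamEmailClassification | SpamClassifier/EmailConverter.py | convert_email
-- ===== SOURCE A (Python) =====
-- def convert_email(words, word_dictionary):
--     freq_array = [0 for i in range(len(word_dictionary))]
--     for word in words:
--         try:
--             index =  word_dictionary.index(word)
--             freq_array[index] = freq_array[index] + 1
--         except:
--             continue
--     return freq_array
-- ===== SOURCE B (Python) =====
-- def convert_email(words, word_dictionary):
--     first = {}
--     for i, w in enumerate(word_dictionary):
--         first.setdefault(w, i)
--     counts = {}
--     for w in words:
--         counts[w] = counts.get(w, 0) + 1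
--     return [counts.get(w, 0) if first[w] == i else 0
--             for i, w in enumerate(word_dictionary)]
-- ===== Notes on version B (the rewrite author's own statement) =====
-- stated objective: faster
-- what changed: Replaced the per-word linear .index scan with two hash maps built once (first occurrence index of each dictionary word, and word counts) and a single comprehension over dictionary positions that places each word's count at its first index.
import Mathlib
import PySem

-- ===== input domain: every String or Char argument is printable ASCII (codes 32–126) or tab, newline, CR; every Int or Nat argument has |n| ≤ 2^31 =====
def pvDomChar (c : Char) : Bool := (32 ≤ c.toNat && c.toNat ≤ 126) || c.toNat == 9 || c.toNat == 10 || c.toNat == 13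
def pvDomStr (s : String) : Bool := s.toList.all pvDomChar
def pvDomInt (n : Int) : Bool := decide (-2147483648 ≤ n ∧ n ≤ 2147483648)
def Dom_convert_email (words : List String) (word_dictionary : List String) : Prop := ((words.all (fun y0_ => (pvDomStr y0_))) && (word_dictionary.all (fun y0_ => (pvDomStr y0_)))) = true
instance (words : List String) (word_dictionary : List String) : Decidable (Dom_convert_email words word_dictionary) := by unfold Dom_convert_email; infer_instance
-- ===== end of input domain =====

-- B replaces A's per-word linear .index scan by two dicts built once (first occurrence
-- index per dictionary word, word counts) and one comprehension over dictionary positions.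

-- ===== PORT A =====
-- one iteration of A's `for word in words` body (the try/except: a missing word is skipped)
def convert_email_step (word_dictionary : List String) (freq : List Int) (word : String) : List Int :=
  match PySem.List.index? word_dictionary word with
  | some idx => PySem.List.pySetD freq (idx : Int) (PySem.List.pyGetD freq (idx : Int) 0 + 1)
  | none => freq

def convert_email (words : List String) (word_dictionary : List String) : List Int :=
  words.foldl (convert_email_step word_dictionary)
    ((PySem.List.pyRange 0 (word_dictionary.length : Int) 1).map (fun _ => (0 : Int)))

-- ===== PORT B =====
-- `first[w] == i`: w is always a key of `first` (every dictionary word was setdefault'ed),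
-- so Python's lookup never raises; it is ported as `first.get? w = some i`.
def convert_email_alt (words : List String) (word_dictionary : List String) : List Int :=
  let first : PySem.Dict String Int :=
    (PySem.List.enumerate word_dictionary).foldl (fun d p => d.setdefault p.2 p.1) PySem.Dict.empty
  let counts : PySem.Dict String Int :=
    words.foldl (fun d w => d.insert w (d.getD w 0 + 1)) PySem.Dict.empty
  (PySem.List.enumerate word_dictionary).map (fun p =>
    if first.get? p.2 = some p.1 then counts.getD p.2 0 else 0)

-- ===== PRECONDITION & SPEC =====
def Spec_convert_email (words : List String) (word_dictionary : List String) (out : List Int) : Prop := out = convert_email_alt words word_dictionary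
instance (words : List String) (word_dictionary : List String) (out : List Int) : Decidable (Spec_convert_email words word_dictionary out) := by unfold Spec_convert_email; infer_instance

-- ===== CLAIM (what is proved, stated in full; the proofs are below) =====
def Claim_equal_convert_email : Prop := ∀ (words : List String) (word_dictionary : List String), Dom_convert_email words word_dictionary → Spec_convert_email words word_dictionary (convert_email words word_dictionary)

-- ===== LEMMAS AND PROOFS =====

theorem convert_email_step_length (wd : List String) (freq : List Int) (w : String) :
    (convert_email_step wd freq w).length = freq.length := by
  unfold convert_email_step
  cases h : PySem.List.index? wd w with
  | none => rfl
  | some idx => simp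

theorem convert_email_fold_length (wd : List String) (ws : List String) (freq : List Int) :
    (ws.foldl (convert_email_step wd) freq).length = freq.length := by
  induction ws generalizing freq with
  | nil => rfl
  | cons w ws ih => simpa [List.foldl, convert_email_step_length] using ih (convert_email_step wd freq w)

-- loop invariant of A: each slot grows by the number of processed words whose
-- first dictionary index is that slot
theorem convert_email_fold_get (wd : List String) (ws : List String) (freq : List Int)
    (hlen : freq.length = wd.length) (i : Nat) (hi : i < freq.length) :
    (ws.foldl (convert_email_step wd) freq)[i]'(by simpa [convert_email_fold_length] using hi)
      = freq[i] + (ws.countP (fun w => PySem.List.index? wd w == some i) : Int) := by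
  induction ws generalizing freq with
  | nil => simp
  | cons w ws ih =>
    simp only [List.foldl_cons, List.countP_cons]
    cases h : List.idxOf? w wd with
    | none =>
      have hstep0 : convert_email_step wd freq w = freq := by
        simp [convert_email_step, PySem.List.index?_eq_idxOf?, h]
      have hpw : (PySem.List.index? wd w == some i) = false := by
        simp [PySem.List.index?_eq_idxOf?, h]
      simp only [hstep0, hpw, Bool.false_eq_true, if_false, Nat.add_zero]
      exact ih freq hlen hi
    | some idx =>
      have h' : PySem.List.index? wd w = some idx := by
        rw [PySem.List.index?_eq_idxOf?]; exact h
      obtain ⟨hidx, -, -⟩ := PySem.List.getElem_of_index?_eq_some h'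
      have hidx' : idx < freq.length := by omega
      have hset : convert_email_step wd freq w = freq.set idx (freq[idx] + 1) := by
        simp [convert_email_step, PySem.List.index?_eq_idxOf?, h, PySem.List.pySetD_natCast,
          PySem.List.pyGetD_natCast, List.getD_eq_getElem?_getD, List.getElem?_eq_getElem hidx']
      simp only [hset]
      rw [ih (freq.set idx (freq[idx] + 1)) (by simpa using hlen) (by simpa using hi)]
      by_cases hii : i = idx
      · subst hii
        have hpw : (PySem.List.index? wd w == some i) = true := by
          simp only [beq_iff_eq, PySem.List.index?_eq_idxOf?]; exact h
        simp only [hpw, if_true, List.getElem_set_self]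
        push_cast
        ring
      · rw [List.getElem_set_ne (by omega)]
        have hpw : (PySem.List.index? wd w == some i) = false := by
          simp only [h', beq_eq_false_iff_ne, ne_eq, Option.some.injEq]; omega
        simp only [hpw, Bool.false_eq_true, if_false, Nat.add_zero]

-- pointwise value of the fold from the all-zero start, as B computes it
theorem countP_index_eq (wd : List String) (ws : List String) (i : Nat) (hi : i < wd.length) :
    (ws.countP (fun w => PySem.List.index? wd w == some i) : Int)
      = if PySem.List.index? wd wd[i] = some i then (PySem.List.count ws wd[i] : Int) else 0 := by
  by_cases hfirst : PySem.List.index? wd wd[i] = some i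
  · rw [if_pos hfirst]
    have : ws.countP (fun w => PySem.List.index? wd w == some i) = ws.count wd[i] := by
      rw [List.count]
      apply List.countP_congr
      intro w _
      constructor
      · intro hw
        have hw' : PySem.List.index? wd w = some i := by simpa using hw
        obtain ⟨_, hget, -⟩ := PySem.List.getElem_of_index?_eq_some hw'
        simp [← hget]
      · intro hw
        have hww : w = wd[i] := by simpa using hw
        subst hww
        simpa using hfirst
    rw [PySem.List.count_eq, this]
  · rw [if_neg hfirst]
    have hz : ws.countP (fun w => PySem.List.index? wd w == some i) = 0 := by
      rw [List.countP_eq_zero]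
      intro w _
      simp only [beq_iff_eq, PySem.List.index?_eq_idxOf?]
      intro hw
      have hw' : PySem.List.index? wd w = some i := by
        rw [PySem.List.index?_eq_idxOf?]; exact hw
      obtain ⟨_, hget, -⟩ := PySem.List.getElem_of_index?_eq_some hw'
      exact hfirst (hget ▸ hw')
    exact_mod_cast hz

-- the setdefault loop over enumerate builds exactly the first-occurrence-index map
theorem first_get? (wd : List String) (s : Int) (d : PySem.Dict String Int) (w : String) :
    ((PySem.List.enumerate wd s).foldl (fun d p => d.setdefault p.2 p.1) d).get? w
      = (d.get? w).or ((PySem.List.index? wd w).map (fun k => s + (k : Int))) := by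
  induction wd generalizing s d with
  | nil => simp [PySem.List.enumerate_nil]
  | cons x xs ih =>
    rw [PySem.List.enumerate_cons, List.foldl_cons, ih]
    dsimp only
    by_cases hw : w = x
    · subst hw
      rw [PySem.Dict.get?_setdefault_self, PySem.List.index?_cons_self]
      cases hd : d.get? w <;> simp [Option.or]
    · rw [PySem.Dict.get?_setdefault_of_ne d s hw,
        show PySem.List.index? (x :: xs) w = (PySem.List.index? xs w).map (· + 1) from
          PySem.List.index?_cons_of_ne xs (Ne.symm hw)]
      cases hx : PySem.List.index? xs w with
      | none => simp [Option.or]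
      | some k =>
        cases hd : d.get? w
        · simp [Option.or]; ring
        · simp [Option.or]

theorem init_eq_replicate (n : Nat) :
    ((PySem.List.pyRange 0 (n : Int) 1).map (fun _ => (0 : Int))) = List.replicate n (0 : Int) := by
  rw [PySem.List.pyRange_zero_natCast]
  simp [Function.comp_def, List.map_const']

-- ===== VERDICT (by name: the statement is the Claim_ definition above) =====
theorem convert_email_spec : Claim_equal_convert_email := by
  intro ws wd _
  unfold Spec_convert_email convert_email convert_email_alt
  rw [init_eq_replicate]
  apply List.ext_getElem
  · simp [convert_email_fold_length, PySem.List.length_enumerate]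
  · intro i h1 h2
    have hi : i < wd.length := by
      simpa [convert_email_fold_length] using h1
    rw [convert_email_fold_get wd ws _ (by simp) i (by simpa using hi)]
    rw [List.getElem_map, PySem.List.getElem_enumerate]
    simp only [List.getElem_replicate, zero_add, first_get?, PySem.Dict.get?_empty,
      Option.or, PySem.Dict.getD_foldl_insert_add_one, PySem.Dict.getD_empty, zero_add]
    rw [countP_index_eq wd ws i hi, PySem.List.count_eq]
    cases hfirst : PySem.List.index? wd wd[i] with
    | none => simp
    | some k =>
      by_cases hk : k = i
      · subst hk; simp
      · simp [hk]
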